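-- pv_equiv track=rewrite | github.com/rawatamit/adventofcode | 2021/d25.py | move_sea_cucumber
-- ===== SOURCE A (Python) =====
-- def move_sea_cucumber(l, orientation):
--     i = 0
--     nl = ['' for _ in range(len(l))]
--     is_modified = False
--
--     while i < len(l):
--         ni = 0 if i == len(l) - 1 else i + 1
--         if l[i] == orientation and l[ni] == '.':
--             nl[i] = '.'
--             nl[ni] = orientation
--             i += 2
--             is_modified = True
--         else:
--             nl[i] = l[i]
--             i += 1
--     return is_modified, nl
-- ===== SOURCE B (Python) =====
-- def move_sea_cucumber(l, orientation):
--     n = len(l)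
--     nl = [
--         ('.' if l[(j + 1) % n] == '.' else orientation) if l[j] == orientation
--         else (orientation if l[(j - 1) % n] == orientation else '.') if l[j] == '.'
--         else l[j]
--         for j in range(n)
--     ]
--     is_modified = any(l[j] == orientation and l[(j + 1) % n] == '.' for j in range(n))
--     return is_modified, nl
-- ===== Notes on version B (the rewrite author's own statement) =====
-- stated objective: simpler
-- what changed: Replaced the stateful left-to-right pass with skip-by-2 and in-place wrap overwrite by a pure per-cell comprehension over the old grid plus a separate any() for the modified flag; the branchless single comprehension also measured faster by a constant factor.
import Mathlib
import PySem

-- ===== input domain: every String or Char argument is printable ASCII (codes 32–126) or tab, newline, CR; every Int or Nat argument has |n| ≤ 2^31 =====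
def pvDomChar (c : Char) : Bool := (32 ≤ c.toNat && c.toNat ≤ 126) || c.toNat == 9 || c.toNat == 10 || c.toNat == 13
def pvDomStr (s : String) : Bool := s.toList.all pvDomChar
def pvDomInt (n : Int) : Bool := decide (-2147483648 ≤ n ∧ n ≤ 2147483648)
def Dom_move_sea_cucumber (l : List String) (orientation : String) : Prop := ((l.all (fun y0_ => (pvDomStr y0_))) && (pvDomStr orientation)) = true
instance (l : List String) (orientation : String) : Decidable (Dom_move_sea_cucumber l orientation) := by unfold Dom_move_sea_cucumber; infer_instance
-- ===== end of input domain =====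

-- B replaces A's stateful skip-by-2 pass with in-place wrap overwrite by a pure per-cell
-- function of the old grid plus a separate any() for the flag (simpler decomposition, same cost).

-- ===== PORT A =====
-- literal transliteration of A's while-loop; l[i] with 0 ≤ i < len(l) is l.getD i ""
def pvMoveLoop (l : List String) (o : String) (i : Nat) (nl : List String) (m : Bool) : Bool × List String :=
  if h : i < l.length then
    let ni : Nat := if i = l.length - 1 then 0 else i + 1
    if l.getD i "" = o ∧ l.getD ni "" = "." then
      pvMoveLoop l o (i + 2) ((nl.set i ".").set ni o) true
    else
      pvMoveLoop l o (i + 1) (nl.set i (l.getD i "")) m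
  else (m, nl)
termination_by l.length - i
decreasing_by all_goals omega

def move_sea_cucumber (l : List String) (orientation : String) : Bool × List String :=
  pvMoveLoop l orientation 0 (List.replicate l.length "") false

-- ===== PORT B =====
-- per-cell value of B's comprehension; Python's (j-1) % n equals (j + n - 1) % n for 0 ≤ j < n
def pvCellNew (l : List String) (o : String) (n j : Nat) : String :=
  if l.getD j "" = o then (if l.getD ((j + 1) % n) "" = "." then "." else o)
  else if l.getD j "" = "." then (if l.getD ((j + n - 1) % n) "" = o then o else ".")
  else l.getD j ""

def move_sea_cucumber_alt (l : List String) (orientation : String) : Bool × List String :=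
  let n := l.length
  let nl := (List.range n).map (fun j => pvCellNew l orientation n j)
  let m := (List.range n).any (fun j =>
    decide (l.getD j "" = orientation ∧ l.getD ((j + 1) % n) "" = "."))
  (m, nl)

-- ===== PRECONDITION & SPEC =====
def Spec_move_sea_cucumber (l : List String) (orientation : String) (out : Bool × List String) : Prop := out = move_sea_cucumber_alt l orientation
instance (l : List String) (orientation : String) (out : Bool × List String) : Decidable (Spec_move_sea_cucumber l orientation out) := by unfold Spec_move_sea_cucumber; infer_instance

-- ===== CLAIM (what is proved, stated in full; the proofs are below) =====
def Claim_equal_move_sea_cucumber : Prop := ∀ (l : List String) (orientation : String), Dom_move_sea_cucumber l orientation → Spec_move_sea_cucumber l orientation (move_sea_cucumber l orientation)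

-- ===== LEMMAS AND PROOFS =====

-- proof-only helpers: A's move condition at index i, and which indices A's loop visits
def pvCond (l : List String) (o : String) (i : Nat) : Bool :=
  decide (l.getD i "" = o ∧ l.getD (if i = l.length - 1 then 0 else i + 1) "" = ".")

def pvVisited (l : List String) (o : String) : Nat → Bool
  | 0 => true
  | i + 1 => !(pvVisited l o i && pvCond l o i)

-- whether A performs the wrap move (at step n-1, overwriting position 0)
def pvWrap (l : List String) (o : String) : Bool :=
  decide (2 ≤ l.length) && pvVisited l o (l.length - 1) && pvCond l o (l.length - 1)

theorem pv_getD_set_eq (nl : List String) (i : Nat) (v : String) (h : i < nl.length) :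
    (nl.set i v).getD i "" = v := by
  simp [List.getD_eq_getElem?_getD, h]

theorem pv_getD_set_ne (nl : List String) (i j : Nat) (v : String) (h : j ≠ i) :
    (nl.set i v).getD j "" = nl.getD j "" := by
  simp [List.getD_eq_getElem?_getD, Ne.symm h]

theorem pvNi_eq_mod (n i : Nat) (h : i < n) :
    (if i = n - 1 then 0 else i + 1) = (i + 1) % n := by
  by_cases he : i = n - 1
  · rw [if_pos he]
    have : i + 1 = n := by omega
    rw [this, Nat.mod_self]
  · rw [if_neg he]
    exact (Nat.mod_eq_of_lt (by omega)).symm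

theorem pv_cell_cond (l : List String) (o : String) (i : Nat) (hi : i < l.length)
    (hc : pvCond l o i = true) : pvCellNew l o l.length i = "." := by
  simp only [pvCond, decide_eq_true_eq] at hc
  obtain ⟨h1, h2⟩ := hc
  rw [pvNi_eq_mod l.length i hi] at h2
  unfold pvCellNew
  rw [if_pos h1, if_pos h2]

theorem pv_cell_skipped (l : List String) (o : String) (i : Nat) (hi : i + 1 < l.length)
    (hc : pvCond l o i = true) : pvCellNew l o l.length (i + 1) = o := by
  simp only [pvCond, decide_eq_true_eq] at hc
  have hne : ¬ i = l.length - 1 := by omega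
  rw [if_neg hne] at hc
  obtain ⟨h1, h2⟩ := hc
  have hprev : (i + 1 + l.length - 1) % l.length = i := by
    have he : i + 1 + l.length - 1 = i + l.length := by omega
    rw [he, Nat.add_mod_right, Nat.mod_eq_of_lt (by omega)]
  unfold pvCellNew
  by_cases ho : l.getD (i + 1) "" = o
  · have hodot : o = "." := ho.symm.trans h2
    rw [if_pos ho, hodot, ite_self]
  · rw [if_neg ho, if_pos h2, hprev, if_pos h1]

theorem pv_visited_succ_true (l : List String) (o : String) (i : Nat)
    (hv : pvVisited l o (i + 1) = true) : pvVisited l o i = false ∨ pvCond l o i = false := by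
  simp only [pvVisited, Bool.not_eq_eq_eq_not, Bool.not_true, Bool.and_eq_false_iff] at hv
  rcases hv with h | h
  · exact Or.inl h
  · exact Or.inr h

theorem pv_visited_succ_false (l : List String) (o : String) (i : Nat)
    (hv : pvVisited l o (i + 1) = false) : pvVisited l o i = true ∧ pvCond l o i = true := by
  simp only [pvVisited, Bool.not_eq_eq_eq_not, Bool.not_false, Bool.and_eq_true] at hv
  exact hv

-- a visited, non-moving cell at positive index keeps its old value under B as well
theorem pv_cell_stay (l : List String) (o : String) (i : Nat) (hi : i < l.length) (hpos : 0 < i)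
    (hv : pvVisited l o i = true) (hc : pvCond l o i = false) :
    pvCellNew l o l.length i = l.getD i "" := by
  simp only [pvCond, decide_eq_false_iff_not] at hc
  unfold pvCellNew
  by_cases ho : l.getD i "" = o
  · have h2 : ¬ l.getD (if i = l.length - 1 then 0 else i + 1) "" = "." := fun h => hc ⟨ho, h⟩
    rw [pvNi_eq_mod l.length i hi] at h2
    rw [if_pos ho, if_neg h2]
    exact ho.symm
  · by_cases hd : l.getD i "" = "."
    · have hprev : (i + l.length - 1) % l.length = i - 1 := by
        have he : i + l.length - 1 = (i - 1) + l.length := by omega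
        rw [he, Nat.add_mod_right, Nat.mod_eq_of_lt (by omega)]
      by_cases hp : l.getD (i - 1) "" = o
      · exfalso
        obtain ⟨i', rfl⟩ : ∃ i', i = i' + 1 := ⟨i - 1, by omega⟩
        simp only [Nat.add_sub_cancel] at hp
        have hci' : pvCond l o i' = true := by
          have hne : ¬ i' = l.length - 1 := by omega
          unfold pvCond
          rw [if_neg hne]
          exact decide_eq_true ⟨hp, hd⟩
        have hvi' : pvVisited l o i' = false := by
          rcases pv_visited_succ_true l o i' hv with h | h
          · exact h
          · rw [hci'] at h; exact absurd h (by decide)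
        obtain ⟨i'', rfl⟩ : ∃ i'', i' = i'' + 1 := by
          cases i' with
          | zero => simp [pvVisited] at hvi'
          | succ k => exact ⟨k, rfl⟩
        obtain ⟨_, hcd⟩ := pv_visited_succ_false l o i'' hvi'
        simp only [pvCond, decide_eq_true_eq] at hcd
        have hne'' : ¬ i'' = l.length - 1 := by omega
        rw [if_neg hne''] at hcd
        rw [hcd.2] at hp
        exact ho (hd.trans hp)
      · rw [if_neg ho, if_pos hd, hprev, if_neg hp]
        exact hd.symm
    · rw [if_neg ho, if_neg hd]

-- the same for position 0 when A does not perform the wrap move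
theorem pv_cell_stay0 (l : List String) (o : String) (h0 : 0 < l.length)
    (hc : pvCond l o 0 = false) (hw : pvWrap l o = false) :
    pvCellNew l o l.length 0 = l.getD 0 "" := by
  simp only [pvCond, decide_eq_false_iff_not] at hc
  unfold pvCellNew
  by_cases ho : l.getD 0 "" = o
  · have h2 : ¬ l.getD (if 0 = l.length - 1 then 0 else 0 + 1) "" = "." := fun h => hc ⟨ho, h⟩
    rw [pvNi_eq_mod l.length 0 h0] at h2
    rw [if_pos ho, if_neg h2]
    exact ho.symm
  · by_cases hd : l.getD 0 "" = "."
    · have hprev : (0 + l.length - 1) % l.length = l.length - 1 := by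
        have he : 0 + l.length - 1 = l.length - 1 := by omega
        rw [he, Nat.mod_eq_of_lt (by omega)]
      by_cases hp : l.getD (l.length - 1) "" = o
      · exfalso
        by_cases hn1 : l.length = 1
        · rw [hn1] at hp; simp at hp; exact ho hp
        · have hcn : pvCond l o (l.length - 1) = true := by
            unfold pvCond
            rw [if_pos rfl]
            exact decide_eq_true ⟨hp, hd⟩
          have hvn : pvVisited l o (l.length - 1) = false := by
            cases h : pvVisited l o (l.length - 1) with
            | true =>
              exfalso
              have hW : pvWrap l o = true := by
                unfold pvWrap
                rw [h, hcn, Bool.and_true, Bool.and_true, decide_eq_true_eq]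
                omega
              rw [hW] at hw; exact absurd hw (by decide)
            | false => rfl
          obtain ⟨k, hk⟩ : ∃ k, l.length - 1 = k + 1 := ⟨l.length - 2, by omega⟩
          rw [hk] at hvn
          obtain ⟨_, hcd⟩ := pv_visited_succ_false l o k hvn
          simp only [pvCond, decide_eq_true_eq] at hcd
          have hne : ¬ k = l.length - 1 := by omega
          rw [if_neg hne] at hcd
          have hdot : l.getD (l.length - 1) "" = "." := by rw [hk]; exact hcd.2
          rw [hdot] at hp
          exact ho (hd.trans hp)
      · rw [if_neg ho, if_pos hd, hprev, if_neg hp]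
        exact hd.symm
    · rw [if_neg ho, if_neg hd]

-- if A performs the wrap move, B gives position 0 the value o
theorem pv_cell_wrap0 (l : List String) (o : String) (hw : pvWrap l o = true) :
    pvCellNew l o l.length 0 = o := by
  have hn2 : 2 ≤ l.length := by
    simp only [pvWrap, Bool.and_eq_true, decide_eq_true_eq] at hw
    exact hw.1.1
  have hcn : pvCond l o (l.length - 1) = true := by
    simp only [pvWrap, Bool.and_eq_true] at hw
    exact hw.2
  unfold pvCond at hcn
  rw [if_pos rfl, decide_eq_true_eq] at hcn
  obtain ⟨h1, h2⟩ := hcn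
  unfold pvCellNew
  by_cases ho : l.getD 0 "" = o
  · have hodot : o = "." := ho.symm.trans h2
    rw [if_pos ho, hodot, ite_self]
  · have hprev : (0 + l.length - 1) % l.length = l.length - 1 := by
      have he : 0 + l.length - 1 = l.length - 1 := by omega
      rw [he, Nat.mod_eq_of_lt (by omega)]
    rw [if_neg ho, if_pos h2, hprev, if_pos h1]

-- main loop invariant: from any consistently-reached state, A's loop lands on B's grid
theorem pv_loop_eq (l : List String) (o : String) :
    ∀ k i (nl : List String) (m : Bool),
      l.length - i ≤ k →
      pvVisited l o i = true →
      nl.length = l.length →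
      (∀ j, 0 < j → j < i → j < l.length → nl.getD j "" = pvCellNew l o l.length j) →
      (0 < i → 0 < l.length →
        nl.getD 0 "" = if pvWrap l o && decide (i ≤ l.length - 1) then "." else pvCellNew l o l.length 0) →
      pvMoveLoop l o i nl m =
        (m || (List.range' i (l.length - i)).any (fun j => pvVisited l o j && pvCond l o j),
         (List.range l.length).map (fun j => pvCellNew l o l.length j)) := by
  intro k
  induction k with
  | zero =>
    intro i nl m hk hv hlen hinv h0
    have hni : ¬ i < l.length := by omega
    rw [pvMoveLoop, dif_neg hni]
    have hr : l.length - i = 0 := by omega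
    rw [hr]
    simp only [List.range'_zero, List.any_nil, Bool.or_false]
    refine Prod.ext rfl ?_
    apply List.ext_getElem
    · simp [hlen]
    · intro j hj hj2
      have hjl : j < l.length := by simpa [hlen] using hj
      have hgd : nl[j] = nl.getD j "" := by
        rw [List.getD_eq_getElem?_getD, List.getElem?_eq_getElem hj]; rfl
      rw [hgd]
      by_cases hj0 : 0 < j
      · rw [hinv j hj0 (by omega) hjl]; simp
      · have hj00 : j = 0 := by omega
        subst hj00
        have h0' := h0 (by omega) (by omega)
        have hwle : (pvWrap l o && decide (i ≤ l.length - 1)) = false := by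
          have hle : ¬ i ≤ l.length - 1 := by omega
          simp [hle]
        rw [hwle, if_neg (by simp)] at h0'
        rw [h0']; simp
  | succ k ih =>
    intro i nl m hk hv hlen hinv h0
    by_cases hni : i < l.length
    · rw [pvMoveLoop, dif_pos hni]
      by_cases hcond : l.getD i "" = o ∧ l.getD (if i = l.length - 1 then 0 else i + 1) "" = "."
      · rw [if_pos hcond]
        have hcB : pvCond l o i = true := by unfold pvCond; exact decide_eq_true hcond
        have hanyi : (List.range' i (l.length - i)).any (fun j => pvVisited l o j && pvCond l o j) = true := by
          rw [List.any_eq_true]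
          refine ⟨i, ?_, by simp [hv, hcB]⟩
          have : l.length - i = (l.length - i - 1) + 1 := by omega
          rw [this, List.range'_succ]
          exact List.mem_cons_self
        have hv2 : pvVisited l o (i + 2) = true := by
          simp [pvVisited, hv, hcB]
        by_cases hwrapcase : i = l.length - 1
        · -- wrap move: ni = 0; writes nl[i] := "." then nl[0] := o; next i = i+2 ≥ len
          simp only [if_pos hwrapcase]
          set nl' := (nl.set i ".").set 0 o with hnl'
          have hlen' : nl'.length = l.length := by simp [hnl', hlen]
          by_cases hn1 : l.length = 1
          · -- n = 1: i = 0, both writes hit position 0; cond forces o = "."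
            have hi0 : i = 0 := by omega
            have hcB0 : pvCond l o 0 = true := by rw [← hi0]; exact hcB
            have hodot : o = "." := by
              have h := hcB0
              unfold pvCond at h
              rw [if_pos (by omega : (0:Nat) = l.length - 1), decide_eq_true_eq] at h
              exact h.1.symm.trans h.2
            have hrec := ih (i + 2) nl' true (by omega) hv2 hlen'
              (by intro j hj1 hj2 hj3; omega)
              (by
                intro _ _
                have hW : pvWrap l o = false := by
                  simp [pvWrap]; omega
                rw [hW]
                simp only [Bool.false_and, if_neg (by simp : ¬ (false = true))]
                have hval : nl'.getD 0 "" = o := by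
                  rw [hnl', hi0]
                  exact pv_getD_set_eq _ 0 o (by simp [hlen]; omega)
                rw [hval, pv_cell_cond l o 0 (by omega) hcB0, hodot])
            rw [hrec]
            refine Prod.ext ?_ rfl
            simp [hanyi]
          · -- n ≥ 2
            have hn2 : 2 ≤ l.length := by omega
            have hW : pvWrap l o = true := by
              simp only [pvWrap]
              rw [← hwrapcase]
              simp [hv, hcB]; omega
            have hipos : 0 < i := by omega
            have hrec := ih (i + 2) nl' true (by omega) hv2 hlen'
              (by
                intro j hj1 hj2 hj3
                by_cases hji : j = i
                · subst hji
                  rw [hnl', pv_getD_set_ne _ 0 j o (by omega), pv_getD_set_eq _ j "." (by rw [hlen]; omega)]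
                  exact (pv_cell_cond l o j hni hcB).symm
                · have hji' : j < i := by omega
                  rw [hnl', pv_getD_set_ne _ 0 j o (by omega), pv_getD_set_ne _ i j "." hji]
                  exact hinv j hj1 hji' hj3)
              (by
                intro _ _
                have hval : nl'.getD 0 "" = o := pv_getD_set_eq _ 0 o (by simp [hlen]; omega)
                have hle : ¬ i + 2 ≤ l.length - 1 := by omega
                simp only [hle, decide_false, Bool.and_false, if_neg (by simp : ¬ (false = true))]
                rw [hval, pv_cell_wrap0 l o hW])
            rw [hrec]
            refine Prod.ext ?_ rfl
            simp [hanyi]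
        · -- non-wrap move: ni = i+1 < len; writes nl[i] := "." and nl[i+1] := o
          simp only [if_neg hwrapcase]
          have hi1 : i + 1 < l.length := by omega
          set nl' := (nl.set i ".").set (i + 1) o with hnl'
          have hlen' : nl'.length = l.length := by simp [hnl', hlen]
          have hvfalse : pvVisited l o (i + 1) = false := by
            simp [pvVisited, hv, hcB]
          have hrec := ih (i + 2) nl' true (by omega) hv2 hlen'
            (by
              intro j hj1 hj2 hj3
              by_cases hji1 : j = i + 1
              · subst hji1
                rw [hnl', pv_getD_set_eq _ (i+1) o (by simp [hlen]; omega)]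
                exact (pv_cell_skipped l o i hi1 hcB).symm
              · by_cases hji : j = i
                · subst hji
                  rw [hnl', pv_getD_set_ne _ (j+1) j o (by omega), pv_getD_set_eq _ j "." (by rw [hlen]; omega)]
                  exact (pv_cell_cond l o j hni hcB).symm
                · rw [hnl', pv_getD_set_ne _ (i+1) j o hji1, pv_getD_set_ne _ i j "." hji]
                  exact hinv j hj1 (by omega) hj3)
            (by
              intro _ hl0
              by_cases hipos : 0 < i
              · have hval : nl'.getD 0 "" = nl.getD 0 "" := by
                  rw [hnl', pv_getD_set_ne _ (i+1) 0 o (by omega), pv_getD_set_ne _ i 0 "." (by omega)]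
                rw [hval, h0 hipos hl0]
                cases hWc : pvWrap l o with
                | false => simp
                | true =>
                  -- wrap will still happen: i+1 ≠ len-1 (it is skipped), so i+2 ≤ len-1
                  have hne1 : ¬ i + 1 = l.length - 1 := by
                    intro habs
                    have hvn : pvVisited l o (l.length - 1) = true := by
                      simp only [pvWrap, Bool.and_eq_true] at hWc
                      exact hWc.1.2
                    rw [← habs] at hvn
                    rw [hvn] at hvfalse
                    exact absurd hvfalse (by decide)
                  have h1 : i ≤ l.length - 1 := by omega
                  have h2 : i + 2 ≤ l.length - 1 := by omega
                  simp [h1, h2]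
              · -- i = 0: nl'[0] = "."
                have hi0 : i = 0 := by omega
                have hval : nl'.getD 0 "" = "." := by
                  rw [hnl', pv_getD_set_ne _ (i+1) 0 o (by omega), hi0,
                    pv_getD_set_eq _ 0 "." (by rw [hlen]; omega)]
                rw [hval]
                cases hWc : pvWrap l o with
                | true =>
                  have hne1 : ¬ i + 1 = l.length - 1 := by
                    intro habs
                    have hvn : pvVisited l o (l.length - 1) = true := by
                      simp only [pvWrap, Bool.and_eq_true] at hWc
                      exact hWc.1.2
                    rw [← habs] at hvn
                    rw [hvn] at hvfalse
                    exact absurd hvfalse (by decide)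
                  have h2 : i + 2 ≤ l.length - 1 := by omega
                  simp [h2]
                | false =>
                  simp only [Bool.false_and, if_neg (by simp : ¬ (false = true))]
                  exact (pv_cell_cond l o 0 (by omega) (by rw [← hi0]; exact hcB)).symm)
          rw [hrec]
          refine Prod.ext ?_ rfl
          simp [hanyi]
      · rw [if_neg hcond]
        have hcB : pvCond l o i = false := by
          simp only [pvCond, decide_eq_false_iff_not]
          exact hcond
        have hv1 : pvVisited l o (i + 1) = true := by
          simp [pvVisited, hv, hcB]
        set nl' := nl.set i (l.getD i "") with hnl'
        have hlen' : nl'.length = l.length := by simp [hnl', hlen]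
        have hrec := ih (i + 1) nl' m (by omega) hv1 hlen'
          (by
            intro j hj1 hj2 hj3
            by_cases hji : j = i
            · subst hji
              rw [hnl', pv_getD_set_eq _ j _ (by rw [hlen]; omega)]
              exact (pv_cell_stay l o j hni hj1 hv hcB).symm
            · rw [hnl', pv_getD_set_ne _ i j _ hji]
              exact hinv j hj1 (by omega) hj3)
          (by
            intro _ hl0
            by_cases hipos : 0 < i
            · have hval : nl'.getD 0 "" = nl.getD 0 "" := by
                rw [hnl', pv_getD_set_ne _ i 0 _ (by omega)]
              rw [hval, h0 hipos hl0]
              cases hWc : pvWrap l o with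
              | false => simp
              | true =>
                -- wrap needs cond at len-1; here cond i is false, so i ≠ len-1
                have hne1 : ¬ i = l.length - 1 := by
                  intro habs
                  have hcn : pvCond l o (l.length - 1) = true := by
                    simp only [pvWrap, Bool.and_eq_true] at hWc
                    exact hWc.2
                  rw [← habs] at hcn
                  rw [hcn] at hcB
                  exact absurd hcB (by decide)
                have h1 : i ≤ l.length - 1 := by omega
                have h2 : i + 1 ≤ l.length - 1 := by omega
                simp [h1, h2]
            · have hi0 : i = 0 := by omega
              have hval : nl'.getD 0 "" = l.getD 0 "" := by
                rw [hnl', hi0, pv_getD_set_eq _ 0 _ (by rw [hlen]; omega)]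
              rw [hval]
              cases hWc : pvWrap l o with
              | true =>
                have hn2 : 2 ≤ l.length := by
                  simp only [pvWrap, Bool.and_eq_true, decide_eq_true_eq] at hWc
                  exact hWc.1.1
                have hcn : pvCond l o (l.length - 1) = true := by
                  simp only [pvWrap, Bool.and_eq_true] at hWc
                  exact hWc.2
                unfold pvCond at hcn
                rw [if_pos rfl, decide_eq_true_eq] at hcn
                have h2 : i + 1 ≤ l.length - 1 := by
                  have : ¬ i = l.length - 1 := by
                    intro habs
                    have : pvCond l o i = true := by
                      rw [habs]
                      unfold pvCond
                      rw [if_pos rfl]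
                      exact decide_eq_true hcn
                    rw [this] at hcB
                    exact absurd hcB (by decide)
                  omega
                simp only [h2, decide_true, Bool.and_true]
                exact hcn.2
              | false =>
                simp only [Bool.false_and, if_neg (by simp : ¬ (false = true))]
                exact (pv_cell_stay0 l o hl0 (by rw [← hi0]; exact hcB) hWc).symm)
        rw [hrec]
        refine Prod.ext ?_ rfl
        have hsplit : List.range' i (l.length - i) = i :: List.range' (i + 1) (l.length - (i + 1)) := by
          have he : l.length - i = (l.length - (i + 1)) + 1 := by omega
          rw [he, List.range'_succ]
        rw [hsplit]
        simp [hv, hcB]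
    · -- i ≥ len: same as the base case
      rw [pvMoveLoop, dif_neg hni]
      have hr : l.length - i = 0 := by omega
      rw [hr]
      simp only [List.range'_zero, List.any_nil, Bool.or_false]
      refine Prod.ext rfl ?_
      apply List.ext_getElem
      · simp [hlen]
      · intro j hj hj2
        have hjl : j < l.length := by simpa [hlen] using hj
        have hgd : nl[j] = nl.getD j "" := by
          rw [List.getD_eq_getElem?_getD, List.getElem?_eq_getElem hj]; rfl
        rw [hgd]
        by_cases hj0 : 0 < j
        · rw [hinv j hj0 (by omega) hjl]; simp
        · have hj00 : j = 0 := by omega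
          subst hj00
          have h0' := h0 (by omega) (by omega)
          have hwle : (pvWrap l o && decide (i ≤ l.length - 1)) = false := by
            have hle : ¬ i ≤ l.length - 1 := by omega
            simp [hle]
          rw [hwle, if_neg (by simp)] at h0'
          rw [h0']; simp

-- the modified flag: some move fires iff some cell satisfies B's plain condition
theorem pv_any_eq (l : List String) (o : String) :
    (List.range l.length).any (fun j => pvVisited l o j && pvCond l o j) =
    (List.range l.length).any (fun j =>
      decide (l.getD j "" = o ∧ l.getD ((j + 1) % l.length) "" = ".")) := by
  have hcond_eq : ∀ j, j < l.length →
      pvCond l o j = decide (l.getD j "" = o ∧ l.getD ((j + 1) % l.length) "" = ".") := by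
    intro j hj
    simp only [pvCond]
    rw [pvNi_eq_mod l.length j hj]
  cases hA : (List.range l.length).any (fun j => pvVisited l o j && pvCond l o j) with
  | true =>
    rw [List.any_eq_true] at hA
    obtain ⟨j, hjm, hjp⟩ := hA
    rw [List.mem_range] at hjm
    rw [Bool.and_eq_true] at hjp
    symm
    rw [List.any_eq_true]
    exact ⟨j, List.mem_range.mpr hjm, by rw [← hcond_eq j hjm]; exact hjp.2⟩
  | false =>
    symm
    rw [Bool.eq_false_iff]
    intro hB
    rw [List.any_eq_true] at hB
    obtain ⟨j, hjm, hjp⟩ := hB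
    rw [List.mem_range] at hjm
    have hcj : pvCond l o j = true := by rw [hcond_eq j hjm]; exact hjp
    rw [Bool.eq_false_iff] at hA
    apply hA
    rw [List.any_eq_true]
    cases hvj : pvVisited l o j with
    | true => exact ⟨j, List.mem_range.mpr hjm, by simp [hvj, hcj]⟩
    | false =>
      obtain ⟨j', rfl⟩ : ∃ j', j = j' + 1 := by
        cases j with
        | zero => simp [pvVisited] at hvj
        | succ k => exact ⟨k, rfl⟩
      obtain ⟨hv', hc'⟩ := pv_visited_succ_false l o j' hvj
      exact ⟨j', List.mem_range.mpr (by omega), by simp [hv', hc']⟩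

-- ===== VERDICT (by name: the statement is the Claim_ definition above) =====
theorem move_sea_cucumber_spec : Claim_equal_move_sea_cucumber := by
  intro l o _
  unfold Spec_move_sea_cucumber move_sea_cucumber move_sea_cucumber_alt
  have h := pv_loop_eq l o l.length 0 (List.replicate l.length "") false
    (by omega) rfl (by simp) (by intro j hj1 hj2 _; omega) (by intro h _; omega)
  rw [h]
  simp only [Bool.false_or, Nat.sub_zero]
  refine Prod.ext ?_ rfl
  rw [← List.range_eq_range']
  exact pv_any_eq l o
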